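-- pv_equiv track=rewrite | github.com/akaboski/testcorrections | testcorrections.py | merge_protein_counts
-- ===== SOURCE A (Python) =====
-- def merge_protein_counts(dict1, dict2):
--     dict3 = {}
--     for family, count in dict1.items():
--         if family in dict2:
--             dict3[family] = (count, dict2[family])
--         else:
--             dict3[family] = (count, 0)
--     for family, count in dict2.items():
--         if family not in dict1:
--             dict3[family] = (0, count)
--     return dict3
-- ===== SOURCE B (Python) =====
-- def merge_protein_counts(dict1, dict2):
--     # Vector-sum merge: tag dict1 counts into the first slot and dict2 counts into
--     # the second slot, then accumulate one uniform stream by componentwise addition.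
--     # Correct because a key occurs at most once per dict, so each slot receives
--     # either its count or 0, and first-appearance order equals A's insertion order.
--     tagged = [(k, v, 0) for k, v in dict1.items()] + [(k, 0, v) for k, v in dict2.items()]
--     merged = {}
--     for k, a, b in tagged:
--         a0, b0 = merged.get(k, (0, 0))
--         merged[k] = (a0 + a, b0 + b)
--     return merged
-- ===== Notes on version B (the rewrite author's own statement) =====
-- stated objective: alternative
-- what changed: Replaces A's two guarded insertion loops with cross-dict membership tests by one uniform accumulation loop over a tagged stream (dict1 counts tagged into the first slot, dict2 counts into the second) that merges by componentwise addition into a dict of pairs.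
import Mathlib
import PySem

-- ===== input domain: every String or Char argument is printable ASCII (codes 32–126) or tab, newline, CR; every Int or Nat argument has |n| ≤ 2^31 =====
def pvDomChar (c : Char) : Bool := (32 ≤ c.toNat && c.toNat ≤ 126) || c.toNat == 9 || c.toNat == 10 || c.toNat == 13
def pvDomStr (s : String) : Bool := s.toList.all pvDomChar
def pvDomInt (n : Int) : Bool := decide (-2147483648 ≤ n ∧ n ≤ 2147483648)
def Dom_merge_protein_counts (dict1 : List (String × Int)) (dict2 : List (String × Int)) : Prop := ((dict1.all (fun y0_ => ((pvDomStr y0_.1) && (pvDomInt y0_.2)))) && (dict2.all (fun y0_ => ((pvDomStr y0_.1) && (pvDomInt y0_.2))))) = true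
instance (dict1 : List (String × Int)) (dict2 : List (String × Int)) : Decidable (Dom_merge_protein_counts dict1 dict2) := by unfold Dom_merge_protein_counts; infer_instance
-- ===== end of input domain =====

-- B replaces A's two guarded insertion loops (with cross-dict membership tests) by a
-- single uniform fold over a tagged stream, merging counts by componentwise addition
-- (alternative decomposition, same cost).


-- ===== PORT A =====
-- dict arguments are association lists; PySem.Dict.ofList rebuilds the Python dict
-- (last value wins, first-insertion order), then the loops follow A line by line.
def merge_protein_counts (dict1 : List (String × Int)) (dict2 : List (String × Int)) : List (String × Int × Int) :=
  let D1 := PySem.Dict.ofList dict1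
  let D2 := PySem.Dict.ofList dict2
  -- dict3 = {}; for family, count in dict1.items(): …
  let d3 := D1.items.foldl (fun d3 p =>
      if D2.contains p.1 then d3.insert p.1 (p.2, D2.getD p.1 0)   -- dict2[family]; contains holds, so getD is exact
      else d3.insert p.1 (p.2, (0 : Int))) PySem.Dict.empty
  -- for family, count in dict2.items(): if family not in dict1: …
  let d3 := D2.items.foldl (fun d3 p =>
      if !D1.contains p.1 then d3.insert p.1 ((0 : Int), p.2) else d3) d3
  d3.items

-- ===== PORT B =====
-- tagged = [(k,v,0) for dict1] + [(k,0,v) for dict2]; one loop accumulating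
-- componentwise sums (merged[k] = f(merged.get(k,(0,0))) is Dict.modify).
def merge_protein_counts_alt (dict1 : List (String × Int)) (dict2 : List (String × Int)) : List (String × Int × Int) :=
  let D1 := PySem.Dict.ofList dict1
  let D2 := PySem.Dict.ofList dict2
  let tagged := D1.items.map (fun p => (p.1, (p.2, (0 : Int)))) ++ D2.items.map (fun p => (p.1, ((0 : Int), p.2)))
  let merged := tagged.foldl (fun m q =>
      m.modify q.1 ((0 : Int), (0 : Int)) (fun ab => (ab.1 + q.2.1, ab.2 + q.2.2))) PySem.Dict.empty
  merged.items

-- ===== PRECONDITION & SPEC =====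
def Spec_merge_protein_counts (dict1 : List (String × Int)) (dict2 : List (String × Int)) (out : List (String × Int × Int)) : Prop := out = merge_protein_counts_alt dict1 dict2
instance (dict1 : List (String × Int)) (dict2 : List (String × Int)) (out : List (String × Int × Int)) : Decidable (Spec_merge_protein_counts dict1 dict2 out) := by unfold Spec_merge_protein_counts; infer_instance

-- ===== CLAIM (what is proved, stated in full; the proofs are below) =====
def Claim_equal_merge_protein_counts : Prop := ∀ (dict1 : List (String × Int)) (dict2 : List (String × Int)), Dom_merge_protein_counts dict1 dict2 → Spec_merge_protein_counts dict1 dict2 (merge_protein_counts dict1 dict2)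

-- ===== LEMMAS AND PROOFS =====

theorem pv_foldl_guard_filter {α β : Type} (l : List β) (p : β → Bool) (g : α → β → α) (init : α) :
    l.foldl (fun acc x => if p x then g acc x else acc) init = (l.filter p).foldl g init := by
  induction l generalizing init with
  | nil => rfl
  | cons x xs ih =>
    by_cases h : p x = true <;> simp [List.foldl_cons, h, ih]

theorem pv_map_fst_filter_fst {α β : Type} (l : List (α × β)) (q : α → Bool) :
    ((l.filter (fun p => q p.1)).map (fun p => p.1)) = (l.map (fun p => p.1)).filter q := by
  induction l with
  | nil => rfl
  | cons x xs ih => by_cases h : q x.1 = true <;> simp [h, ih]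

theorem pv_filter_map {α β : Type} (l : List α) (h : α → β) (q : β → Bool) :
    (l.map h).filter q = (l.filter (fun x => q (h x))).map h := by
  induction l with
  | nil => rfl
  | cons x xs ih => by_cases hx : q (h x) = true <;> simp [hx, ih]

theorem pv_filter_beq_of_nodup (l : List String) (hnd : l.Nodup) (k : String) :
    l.filter (fun x => x == k) = if k ∈ l then [k] else [] := by
  induction l with
  | nil => simp
  | cons x xs ih =>
    rcases List.nodup_cons.mp hnd with ⟨hx, hxs⟩
    by_cases h : x = k
    · subst h
      have : xs.filter (fun y => y == x) = [] := by
        rw [ih hxs]; simp [hx]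
      simp [this]
    · have hne : (x == k) = false := by simp [h]
      simp [hne, ih hxs, Ne.symm h]

-- the accumulator of B's loop: componentwise sums of the entries seen so far at each key
theorem pv_getD_foldl_vadd (l : List (String × (Int × Int))) (d : PySem.Dict String (Int × Int)) (k : String) :
    (l.foldl (fun m q => m.modify q.1 ((0 : Int), (0 : Int)) (fun ab => (ab.1 + q.2.1, ab.2 + q.2.2))) d).getD k ((0 : Int), (0 : Int))
    = ((d.getD k ((0 : Int), (0 : Int))).1 + ((l.filter (fun q => q.1 == k)).map (fun q => q.2.1)).sum,
       (d.getD k ((0 : Int), (0 : Int))).2 + ((l.filter (fun q => q.1 == k)).map (fun q => q.2.2)).sum) := by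
  induction l generalizing d with
  | nil => simp
  | cons q qs ih =>
    rw [List.foldl_cons, ih]
    by_cases h : q.1 = k
    · subst h
      rw [PySem.Dict.getD_modify_self]
      simp [add_assoc]
    · have hne : (q.1 == k) = false := by simp [h]
      rw [PySem.Dict.getD_modify]
      simp [hne, Ne.symm h]

theorem merge_protein_counts_eq (dict1 dict2 : List (String × Int)) :
    merge_protein_counts dict1 dict2 = merge_protein_counts_alt dict1 dict2 := by
  unfold merge_protein_counts merge_protein_counts_alt
  dsimp only
  set D1 := PySem.Dict.ofList dict1 with hD1
  set D2 := PySem.Dict.ofList dict2 with hD2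
  have hnd1 : D1.keys.Nodup := PySem.Dict.nodup_keys_ofList dict1
  have hnd2 : D2.keys.Nodup := PySem.Dict.nodup_keys_ofList dict2
  have hc : ∀ k : String, PySem.Set.contains D1.keys k = D1.contains k := by
    intro k
    rw [Bool.eq_iff_iff, PySem.Set.contains_iff, PySem.Dict.contains_iff_mem_keys]
  -- ===== A-side: reduce the two loops to an explicit append of two maps =====
  have hstep1 := PySem.List.foldl_congr_mem D1.items
      (fun d3 (p : String × Int) =>
        if D2.contains p.1 then d3.insert p.1 (p.2, D2.getD p.1 0)
        else d3.insert p.1 (p.2, (0 : Int)))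
      (fun d3 (p : String × Int) => d3.insert p.1
        (if D2.contains p.1 then (p.2, D2.getD p.1 0) else (p.2, (0 : Int))))
      PySem.Dict.empty (by
        intro acc x _
        by_cases h : D2.contains x.1 = true <;> simp [h])
  rw [hstep1]
  have h1 : (D1.items.foldl (fun d3 (p : String × Int) => d3.insert p.1
        (if D2.contains p.1 then (p.2, D2.getD p.1 0) else (p.2, (0 : Int)))) PySem.Dict.empty).items
      = D1.items.map (fun p => (p.1,
          if D2.contains p.1 then (p.2, D2.getD p.1 0) else (p.2, (0 : Int)))) := by
    rw [PySem.Dict.items_foldl_insert_fresh _ _ _ _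
        (by intro a _; exact PySem.Dict.contains_empty _) (by exact hnd1)]
    rfl
  have hk1 : (D1.items.foldl (fun d3 (p : String × Int) => d3.insert p.1
        (if D2.contains p.1 then (p.2, D2.getD p.1 0) else (p.2, (0 : Int)))) PySem.Dict.empty).keys
      = D1.keys := by
    show ((D1.items.foldl _ PySem.Dict.empty).items.map (fun p => p.1)) = D1.keys
    rw [h1]; simp; rfl
  rw [pv_foldl_guard_filter]
  rw [PySem.Dict.items_foldl_insert_fresh _ (fun p : String × Int => p.1) (fun p => ((0:Int), p.2)) _
      (by
        intro a ha
        have hna := List.of_mem_filter ha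
        simp only [Bool.not_eq_eq_eq_not, Bool.not_true] at hna
        cases h : PySem.Dict.contains _ a.1 with
        | false => rfl
        | true =>
          exfalso
          have := (PySem.Dict.contains_iff_mem_keys _ _).mp h
          rw [hk1] at this
          rw [(PySem.Dict.contains_iff_mem_keys _ _).mpr this] at hna
          simp at hna)
      (by
        rw [pv_map_fst_filter_fst D2.items (fun k => !D1.contains k)]
        exact hnd2.filter _)]
  rw [h1]
  -- ===== B-side: characterise the merged dict by its keys and its lookups =====
  set step := fun (m : PySem.Dict String (Int × Int)) (q : String × (Int × Int)) =>
      m.modify q.1 ((0 : Int), (0 : Int)) (fun ab => (ab.1 + q.2.1, ab.2 + q.2.2)) with hstepdef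
  set tagged := D1.items.map (fun p => (p.1, (p.2, (0 : Int)))) ++ D2.items.map (fun p => (p.1, ((0 : Int), p.2))) with htagged
  set M := tagged.foldl step PySem.Dict.empty with hM
  have hndM : M.keys.Nodup := by
    rw [hM, hstepdef]
    exact PySem.Dict.nodup_keys_foldl_modify_key tagged (fun q => q.1) _ _ _ PySem.Dict.nodup_keys_empty
  have hkeysM : M.keys = D1.keys ++ D2.keys.filter (fun k => !D1.contains k) := by
    rw [hM, hstepdef]
    rw [PySem.Dict.keys_foldl_modify_key tagged (fun q => q.1) _ _ _]
    show PySem.Set.update PySem.Dict.empty.keys (tagged.map (fun q => q.1)) = _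
    have : tagged.map (fun q : String × (Int × Int) => q.1) = D1.keys ++ D2.keys := by
      rw [htagged, List.map_append, List.map_map, List.map_map]; rfl
    rw [this]
    show PySem.Set.update [] (D1.keys ++ D2.keys) = _
    rw [PySem.Set.update_nil_left, PySem.Set.ofList_append,
        PySem.Set.ofList_eq_self_of_nodup _ hnd1, PySem.Set.update_eq_append_filter,
        PySem.Set.ofList_eq_self_of_nodup _ hnd2]
    congr 1
    exact List.filter_congr (fun k _ => by rw [hc])
  -- lookups in a dict as sums over its items filtered at a key
  have hsum : ∀ (D : PySem.Dict String Int), D.keys.Nodup → ∀ k,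
      ((D.items.filter (fun p => p.1 == k)).map (fun p => p.2)).sum
      = if D.contains k then D.getD k 0 else 0 := by
    intro D hnd k
    rw [PySem.Dict.items_eq_map_keys D hnd 0,
        pv_filter_map D.keys (fun k' => (k', D.getD k' 0)) (fun p => p.1 == k)]
    rw [pv_filter_beq_of_nodup D.keys hnd k]
    by_cases h : k ∈ D.keys
    · simp [h, (PySem.Dict.contains_iff_mem_keys _ _).mpr h]
    · have : D.contains k = false := by
        cases hcc : D.contains k with
        | false => rfl
        | true => exact absurd ((PySem.Dict.contains_iff_mem_keys _ _).mp hcc) h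
      simp [h, this]
  have hgetM : ∀ k, M.getD k ((0 : Int), (0 : Int))
      = ((if D1.contains k then D1.getD k 0 else 0), (if D2.contains k then D2.getD k 0 else 0)) := by
    intro k
    rw [hM, hstepdef, pv_getD_foldl_vadd tagged PySem.Dict.empty k]
    rw [htagged]
    rw [List.filter_append, List.map_append, List.map_append, List.sum_append, List.sum_append]
    rw [pv_filter_map D1.items (fun p => (p.1, (p.2, (0:Int)))) (fun q => q.1 == k),
        pv_filter_map D2.items (fun p => (p.1, ((0:Int), p.2))) (fun q => q.1 == k)]
    simp only [List.map_map]
    have e1 : ((D1.items.filter (fun p => p.1 == k)).map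
        ((fun q : String × (Int × Int) => q.2.1) ∘ (fun p : String × Int => (p.1, (p.2, (0:Int)))))) =
        (D1.items.filter (fun p => p.1 == k)).map (fun p => p.2) := rfl
    have e2 : ((D2.items.filter (fun p => p.1 == k)).map
        ((fun q : String × (Int × Int) => q.2.2) ∘ (fun p : String × Int => (p.1, ((0:Int), p.2))))) =
        (D2.items.filter (fun p => p.1 == k)).map (fun p => p.2) := rfl
    have z1 : (((D1.items.filter (fun p => p.1 == k)).map
        ((fun q : String × (Int × Int) => q.2.2) ∘ (fun p : String × Int => (p.1, (p.2, (0:Int)))))).sum) = 0 := by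
      rw [show ((fun q : String × (Int × Int) => q.2.2) ∘ (fun p : String × Int => (p.1, (p.2, (0:Int))))) = (fun _ : String × Int => (0:Int)) from rfl]
      simp
    have z2 : (((D2.items.filter (fun p => p.1 == k)).map
        ((fun q : String × (Int × Int) => q.2.1) ∘ (fun p : String × Int => (p.1, ((0:Int), p.2))))).sum) = 0 := by
      rw [show ((fun q : String × (Int × Int) => q.2.1) ∘ (fun p : String × Int => (p.1, ((0:Int), p.2)))) = (fun _ : String × Int => (0:Int)) from rfl]
      simp
    rw [e1, e2, z1, z2, hsum D1 hnd1 k, hsum D2 hnd2 k]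
    simp
  -- ===== compare the two item lists segment by segment =====
  rw [PySem.Dict.items_eq_map_keys M hndM ((0 : Int), (0 : Int)), hkeysM, List.map_append]
  congr 1
  · -- dict1 part
    rw [PySem.Dict.items_eq_map_keys D1 hnd1 0, List.map_map]
    refine List.map_congr_left (fun k hk => ?_)
    have h1c : D1.contains k = true := (PySem.Dict.contains_iff_mem_keys _ _).mpr hk
    rw [hgetM k, h1c]
    simp only [Function.comp, if_true]
    by_cases h2 : D2.contains k = true
    · simp [h2]
    · simp only [Bool.not_eq_true] at h2
      simp [h2]
  · -- dict2-only part
    rw [PySem.Dict.items_eq_map_keys D2 hnd2 0,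
        pv_filter_map D2.keys (fun k => (k, D2.getD k 0)) (fun p : String × Int => !D1.contains p.1),
        List.map_map]
    rw [show (fun x : String => !D1.contains ((x, D2.getD x 0) : String × Int).1) = (fun x : String => !D1.contains x) from rfl]
    refine List.map_congr_left (fun k hk => ?_)
    have h1c : D1.contains k = false := by
      simpa using List.of_mem_filter hk
    have h2c : D2.contains k = true :=
      (PySem.Dict.contains_iff_mem_keys _ _).mpr (List.mem_of_mem_filter hk)
    rw [hgetM k, h1c, h2c]
    simp [Function.comp]

-- ===== VERDICT (by name: the statement is the Claim_ definition above) =====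
theorem merge_protein_counts_spec : Claim_equal_merge_protein_counts := by
  intro d1 d2 _
  unfold Spec_merge_protein_counts
  exact merge_protein_counts_eq d1 d2
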